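-- pv_equiv track=rewrite | github.com/AntoineNakhal/Inter-Email | Email Workflow v1/V3/backend/core/email_text.py | _strip_footer
-- ===== SOURCE A (Python) =====
-- FOOTER_MARKERS = (
--     "the content of this message",
--     "this message and any attachments",
--     "this e-mail and any attachments",
--     "if you received this message by mistake",
--     "if you are not the intended recipient",
--     "please reply to this message and delete the email",
--     "ce message et toute piece jointe",
--     "ce courriel et toute piece jointe",
--     "si vous avez recu ce message par erreur",
-- )
--
-- def _strip_footer(lines: list[str]) -> list[str]:
--     kept: list[str] = []
--     for raw_line in lines:
--         line = raw_line.rstrip()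
--         lowered = line.strip().lower()
--         has_visible_content = any(item.strip() for item in kept)
--         if has_visible_content and any(marker in lowered for marker in FOOTER_MARKERS):
--             break
--         kept.append(line)
--     return kept
-- ===== SOURCE B (Python) =====
-- FOOTER_MARKERS = (
--     "the content of this message",
--     "this message and any attachments",
--     "this e-mail and any attachments",
--     "if you received this message by mistake",
--     "if you are not the intended recipient",
--     "please reply to this message and delete the email",
--     "ce message et toute piece jointe",
--     "ce courriel et toute piece jointe",
--     "si vous avez recu ce message par erreur",
-- )
--
--
-- def _strip_footer(lines: list[str]) -> list[str]:
--     stripped = [l.rstrip() for l in lines]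
--     # first visible line
--     v = next((i for i, l in enumerate(stripped) if l.strip()), None)
--     if v is None:
--         return stripped
--     # first footer-marker line strictly after the first visible line
--     for j in range(v + 1, len(stripped)):
--         low = stripped[j].strip().lower()
--         if any(m in low for m in FOOTER_MARKERS):
--             return stripped[:j]
--     return stripped
-- ===== Notes on version B (the rewrite author's own statement) =====
-- stated objective: faster
-- what changed: Replaced the accumulate-into-kept loop that rescans kept for visible content on every iteration with two positional searches (first visible line, then first marker line after it) and a single slice of the rstripped lines.
import Mathlib
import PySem

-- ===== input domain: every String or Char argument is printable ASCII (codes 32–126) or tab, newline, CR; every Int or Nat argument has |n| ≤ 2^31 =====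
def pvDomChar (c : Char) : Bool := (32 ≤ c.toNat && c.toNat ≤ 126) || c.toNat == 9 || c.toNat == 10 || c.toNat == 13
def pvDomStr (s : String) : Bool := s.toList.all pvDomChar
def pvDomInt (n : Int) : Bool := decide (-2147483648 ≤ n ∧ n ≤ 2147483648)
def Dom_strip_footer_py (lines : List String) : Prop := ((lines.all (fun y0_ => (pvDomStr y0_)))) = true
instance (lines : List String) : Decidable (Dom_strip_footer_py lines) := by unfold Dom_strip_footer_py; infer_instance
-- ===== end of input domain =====

-- B replaces the accumulate-and-break loop by two positional searches (first visible line,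
-- first marker line after it) plus a slice; alternative decomposition, same return value.


def FOOTER_MARKERS : List String :=
  [ "the content of this message",
    "this message and any attachments",
    "this e-mail and any attachments",
    "if you received this message by mistake",
    "if you are not the intended recipient",
    "please reply to this message and delete the email",
    "ce message et toute piece jointe",
    "ce courriel et toute piece jointe",
    "si vous avez recu ce message par erreur" ]

-- truthiness of item.strip() in Python: the stripped string is non-empty
def pvIsVisible (l : String) : Bool := PySem.Str.strip l != ""

-- any(marker in lowered for marker in FOOTER_MARKERS)
def pvHasMarker (lowered : String) : Bool :=
  FOOTER_MARKERS.any (fun m => PySem.Str.isIn m lowered)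

-- ===== PORT A =====
-- the for-loop with break, kept as the accumulator
def stripFooterLoop (kept : List String) : List String → List String
  | [] => kept
  | raw :: rest =>
    let line := PySem.Str.rstrip raw
    let lowered := PySem.Str.lower (PySem.Str.strip line)
    let hasVisible := kept.any pvIsVisible
    if hasVisible && pvHasMarker lowered then kept
    else stripFooterLoop (kept ++ [line]) rest

def strip_footer_py (lines : List String) : List String :=
  stripFooterLoop [] lines

-- ===== PORT B =====
def pvIsMarkerLine (l : String) : Bool :=
  pvHasMarker (PySem.Str.lower (PySem.Str.strip l))

-- the range(v+1, len) loop of B: index of the first marker line, counting from j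
def pvFindCut : List String → Nat → Option Nat
  | [], _ => none
  | l :: rest, j => if pvIsMarkerLine l then some j else pvFindCut rest (j + 1)

def strip_footer_py_alt (lines : List String) : List String :=
  let stripped := lines.map PySem.Str.rstrip
  match stripped.findIdx? pvIsVisible with
  | none => stripped
  | some v =>
    match pvFindCut (stripped.drop (v + 1)) (v + 1) with
    | none => stripped
    | some j => stripped.take j

-- ===== PRECONDITION & SPEC =====
def Spec_strip_footer_py (lines : List String) (out : List String) : Prop := out = strip_footer_py_alt lines
instance (lines : List String) (out : List String) : Decidable (Spec_strip_footer_py lines out) := by unfold Spec_strip_footer_py; infer_instance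

-- ===== CLAIM (what is proved, stated in full; the proofs are below) =====
def Claim_equal_strip_footer_py : Prop := ∀ (lines : List String), Dom_strip_footer_py lines → Spec_strip_footer_py lines (strip_footer_py lines)

-- ===== LEMMAS AND PROOFS =====

-- canonical value both programs compute, on the rstripped lines
def pvCanon (ls : List String) : List String :=
  match ls.dropWhile (fun l => !pvIsVisible l) with
  | [] => ls
  | x :: rest =>
    ls.takeWhile (fun l => !pvIsVisible l) ++ x :: rest.takeWhile (fun l => !pvIsMarkerLine l)

theorem canon_cons_invis (x : String) (ms : List String) (h : pvIsVisible x = false) :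
    pvCanon (x :: ms) = x :: pvCanon ms := by
  unfold pvCanon
  simp [List.dropWhile, List.takeWhile, h]
  cases ms.dropWhile (fun l => !pvIsVisible l) <;> simp

theorem canon_cons_vis (x : String) (ms : List String) (h : pvIsVisible x = true) :
    pvCanon (x :: ms) = x :: ms.takeWhile (fun l => !pvIsMarkerLine l) := by
  unfold pvCanon
  simp [List.dropWhile, List.takeWhile, h]

-- once visible content exists, A just appends until the first marker line
theorem loop_vis (lines : List String) : ∀ kept, kept.any pvIsVisible = true →
    stripFooterLoop kept lines =
      kept ++ (lines.map PySem.Str.rstrip).takeWhile (fun l => !pvIsMarkerLine l) := by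
  induction lines with
  | nil => intro kept _; simp [stripFooterLoop]
  | cons raw rest ih =>
    intro kept hk
    simp only [stripFooterLoop, List.map_cons]
    by_cases hm : pvIsMarkerLine (PySem.Str.rstrip raw) = true
    · rw [if_pos (by rw [hk, Bool.true_and]; exact hm)]
      simp [hm]
    · simp at hm
      have hm' : pvHasMarker (PySem.Str.lower (PySem.Str.strip (PySem.Str.rstrip raw))) = false := hm
      rw [if_neg (by rw [hk, Bool.true_and, hm']; simp)]
      rw [ih _ (by simp [hk])]
      simp [hm]

-- while no visible content has been kept, A equals kept ++ canonical tail
theorem loop_invis (lines : List String) : ∀ kept, kept.any pvIsVisible = false →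
    stripFooterLoop kept lines = kept ++ pvCanon (lines.map PySem.Str.rstrip) := by
  induction lines with
  | nil => intro kept _; simp [stripFooterLoop, pvCanon]
  | cons raw rest ih =>
    intro kept hk
    have hk' : kept.any pvIsVisible = true → False := by simp [hk]
    simp only [stripFooterLoop]
    rw [if_neg (by simp [hk])]
    by_cases hv : pvIsVisible (PySem.Str.rstrip raw) = true
    · rw [loop_vis rest (kept ++ [PySem.Str.rstrip raw]) (by simp [hv])]
      simp [canon_cons_vis _ _ hv]
    · simp at hv
      rw [ih (kept ++ [PySem.Str.rstrip raw]) (by simp [hk, hv])]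
      simp [canon_cons_invis _ _ hv]

theorem A_eq_canon (lines : List String) :
    strip_footer_py lines = pvCanon (lines.map PySem.Str.rstrip) := by
  simpa using loop_invis lines [] rfl

-- B side
theorem findCut_shift (ls : List String) : ∀ k,
    pvFindCut ls (k + 1) = (pvFindCut ls k).map (· + 1) := by
  induction ls with
  | nil => intro k; simp [pvFindCut]
  | cons l rest ih =>
    intro k
    by_cases h : pvIsMarkerLine l = true <;> simp [pvFindCut, h, ih]

theorem cut_none (ls : List String) (h : pvFindCut ls 0 = none) :
    ls.takeWhile (fun l => !pvIsMarkerLine l) = ls := by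
  induction ls with
  | nil => simp
  | cons l rest ih =>
    by_cases hm : pvIsMarkerLine l = true
    · simp [pvFindCut, hm] at h
    · simp at hm
      rw [pvFindCut, if_neg (by simp [hm]), findCut_shift] at h
      simp at h
      simp [List.takeWhile, hm, ih h]

theorem cut_some (ls : List String) : ∀ i, pvFindCut ls 0 = some i →
    ls.take i = ls.takeWhile (fun l => !pvIsMarkerLine l) := by
  induction ls with
  | nil => intro i h; simp [pvFindCut] at h
  | cons l rest ih =>
    intro i h
    by_cases hm : pvIsMarkerLine l = true
    · simp [pvFindCut, hm] at h
      simp [← h, List.takeWhile, hm]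
    · simp at hm
      rw [pvFindCut, if_neg (by simp [hm]), findCut_shift] at h
      cases hc : pvFindCut rest 0 with
      | none => simp [hc] at h
      | some i' =>
        simp [hc] at h
        simp [← h, List.takeWhile, hm, ih i' hc]

def pvAltCore (ls : List String) : List String :=
  match ls.findIdx? pvIsVisible with
  | none => ls
  | some v =>
    match pvFindCut (ls.drop (v + 1)) (v + 1) with
    | none => ls
    | some j => ls.take j

theorem altCore_eq_canon (ls : List String) : pvAltCore ls = pvCanon ls := by
  induction ls with
  | nil => simp [pvAltCore, pvCanon]
  | cons x ms ih =>
    by_cases hv : pvIsVisible x = true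
    · have h1 : (x :: ms).findIdx? pvIsVisible = some 0 := by
        simp [List.findIdx?_cons, hv]
      simp only [pvAltCore, h1, List.drop_succ_cons, List.drop_zero]
      rw [canon_cons_vis _ _ hv, findCut_shift]
      cases hc : pvFindCut ms 0 with
      | none => simp [cut_none ms hc]
      | some i => simp [← cut_some ms i hc]
    · simp at hv
      have h1 : (x :: ms).findIdx? pvIsVisible = (ms.findIdx? pvIsVisible).map (· + 1) := by
        simp [List.findIdx?_cons, hv]
      rw [canon_cons_invis _ _ hv]
      cases hf : ms.findIdx? pvIsVisible with
      | none =>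
        have hnil : ms.dropWhile (fun l => !pvIsVisible l) = [] := by
          rw [List.dropWhile_eq_nil_iff]
          intro y hy
          have := List.findIdx?_eq_none_iff.mp hf y hy
          simp [this]
        simp only [pvAltCore, h1, hf] at ih ⊢
        simp [pvCanon, hnil]
      | some v =>
        simp only [pvAltCore, h1, hf, Option.map_some] at ih ⊢
        rw [show v + 1 + 1 = v + 2 from rfl, List.drop_succ_cons, findCut_shift]
        cases hc : pvFindCut (ms.drop (v + 1)) (v + 1) with
        | none => simp only [hc, Option.map_none] at ih ⊢; simpa using ih
        | some j =>
          simp only [hc, Option.map_some] at ih ⊢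
          rw [List.take_succ_cons]
          exact congrArg (x :: ·) ih

theorem B_eq_canon (lines : List String) :
    strip_footer_py_alt lines = pvCanon (lines.map PySem.Str.rstrip) := by
  rw [show strip_footer_py_alt lines = pvAltCore (lines.map PySem.Str.rstrip) from rfl,
    altCore_eq_canon]

-- ===== VERDICT (by name: the statement is the Claim_ definition above) =====
theorem strip_footer_py_spec : Claim_equal_strip_footer_py := by
  intro lines _
  unfold Spec_strip_footer_py
  rw [A_eq_canon, B_eq_canon]
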